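-- pv_equiv track=rewrite | github.com/semi-literatedengineeringstudent/sp23_cs340_.release | mp6/app.py | parse_course_str
-- ===== SOURCE A (Python) =====
-- def parse_course_str(course):
--     course_subject = ""
--     course_number = ""
--     parsed_subject = 0
--     for i in range(0, len(course)):
--         if (course[i] == " "):
--             parsed_subject = 1
--             continue
--         elif (course[i].isdigit() and parsed_subject == 0):
--             course_number = course_number + course[i]
--             parsed_subject = 1
--         elif(parsed_subject == 0):
--             course_subject = course_subject + course[i].upper()
--         else:
--             course_number = course_number + course[i]
--     return (course_subject, course_number)
-- ===== SOURCE B (Python) =====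
-- def parse_course_str(course):
--     # boundary = index of first char that is a space or a digit; subject = uppercased
--     # prefix before it, number = rest with all spaces dropped.
--     i = next((k for k, c in enumerate(course) if c == " " or c.isdigit()), len(course))
--     return (course[:i].upper(), "".join(c for c in course[i:] if c != " "))
-- ===== Notes on version B (the rewrite author's own statement) =====
-- stated objective: idiomatic
-- what changed: Replaces the stateful per-character loop with a flag by computing the boundary (first space or digit), slicing the uppercased subject prefix, and dropping spaces from the remainder.
import Mathlib
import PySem

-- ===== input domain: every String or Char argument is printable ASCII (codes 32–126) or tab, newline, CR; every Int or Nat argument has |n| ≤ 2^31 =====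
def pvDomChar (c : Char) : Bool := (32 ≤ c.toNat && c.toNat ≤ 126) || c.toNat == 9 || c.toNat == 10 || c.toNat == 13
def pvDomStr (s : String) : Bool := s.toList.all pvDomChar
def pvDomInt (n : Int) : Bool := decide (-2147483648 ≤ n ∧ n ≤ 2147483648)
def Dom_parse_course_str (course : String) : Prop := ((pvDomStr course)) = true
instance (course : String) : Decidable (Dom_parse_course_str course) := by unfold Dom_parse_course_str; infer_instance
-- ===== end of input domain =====

-- B replaces A's stateful per-char loop with boundary-slice-and-clean; idiomatic, same cost.

-- ===== PORT A =====
-- one loop step of A: state = (course_subject, course_number, parsed_subject)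
def pvStepA (st : List Char × List Char × Int) (c : Char) : List Char × List Char × Int :=
  if c == ' ' then (st.1, st.2.1, 1)
  else if PySem.Chars.isdigit c && st.2.2 == 0 then (st.1, st.2.1 ++ [c], 1)
  else if st.2.2 == 0 then (st.1 ++ [PySem.Chars.upperChar c], st.2.1, st.2.2)
  else (st.1, st.2.1 ++ [c], st.2.2)

def parse_course_str (course : String) : String × String :=
  let r := course.toList.foldl pvStepA ([], [], 0)
  (String.ofList r.1, String.ofList r.2.1)

-- ===== PORT B =====
-- keep scanning while the char is neither a space nor a digit (B's boundary predicate)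
def pvBefore (c : Char) : Bool := !(c == ' ' || PySem.Chars.isdigit c)

def parse_course_str_alt (course : String) : String × String :=
  let cs := course.toList
  (String.ofList (PySem.Chars.upper (cs.takeWhile pvBefore)),
   String.ofList ((cs.dropWhile pvBefore).filter (fun c => !(c == ' '))))

-- ===== PRECONDITION & SPEC =====
def Spec_parse_course_str (course : String) (out : String × String) : Prop := out = parse_course_str_alt course
instance (course : String) (out : String × String) : Decidable (Spec_parse_course_str course out) := by unfold Spec_parse_course_str; infer_instance

-- ===== CLAIM (what is proved, stated in full; the proofs are below) =====
def Claim_equal_parse_course_str : Prop := ∀ (course : String), Dom_parse_course_str course → Spec_parse_course_str course (parse_course_str course)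

-- ===== LEMMAS AND PROOFS =====

-- once parsed_subject = 1, A just appends every non-space char to the number
theorem pvFoldA_one (cs : List Char) : ∀ (subj num : List Char),
    cs.foldl pvStepA (subj, num, 1) = (subj, num ++ cs.filter (fun c => !(c == ' ')), 1) := by
  induction cs with
  | nil => intro subj num; simp
  | cons c cs ih =>
    intro subj num
    by_cases hsp : c = ' '
    · simp [pvStepA, hsp, ih]
    · simp [pvStepA, hsp, ih]

-- from the initial state, A's result is B's boundary decomposition
theorem pvFoldA_zero (cs : List Char) : ∀ (subj num : List Char),
    cs.foldl pvStepA (subj, num, 0) =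
      (subj ++ PySem.Chars.upper (cs.takeWhile pvBefore),
       num ++ (cs.dropWhile pvBefore).filter (fun c => !(c == ' ')), if cs.takeWhile pvBefore = cs then 0 else 1) := by
  induction cs with
  | nil => intro subj num; simp [PySem.Chars.upper]
  | cons c cs ih =>
    intro subj num
    by_cases hsp : c = ' '
    · simp [pvStepA, hsp, pvBefore, pvFoldA_one, PySem.Chars.upper]
    · by_cases hd : PySem.Chars.isdigit c = true
      · simp [pvStepA, hsp, hd, pvBefore, pvFoldA_one, PySem.Chars.upper]
      · have hb : pvBefore c = true := by simp [pvBefore, hsp, hd]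
        simp only [List.foldl_cons, pvStepA, List.takeWhile_cons, List.dropWhile_cons, hb]
        simp only [hd, Bool.false_and]
        simp [ih, PySem.Chars.upper, hsp]

-- ===== VERDICT (by name: the statement is the Claim_ definition above) =====
theorem parse_course_str_spec : Claim_equal_parse_course_str := by
  intro course _
  unfold Spec_parse_course_str parse_course_str parse_course_str_alt
  simp [pvFoldA_zero]
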